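-- pv_equiv track=rewrite | github.com/AmishaSomaiya/DataStructures-Algorithms | practice-questions-codesignal/sawtooth.py | solution
-- ===== SOURCE A (Python) =====
-- def solution(arr):
--     count = 0
--     n = len(arr)
--
--     if all(x == arr[0] for x in arr):
--         return 0
--
--     for length in range(2, n + 1):
--         for i in range(n - length + 1):
--             subarray = arr[i:i + length]
--             if all(subarray[j - 1] < subarray[j] > subarray[j + 1] or
--                    subarray[j - 1] > subarray[j] < subarray[j + 1] for j in range(1, length - 1)):
--                 count += 1
--
--     return count
-- ===== SOURCE B (Python) =====
-- def solution(arr):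
--     # O(n): a subarray of length>=2 qualifies iff every interior element is a
--     # strict peak or valley; count them by summing maximal "alternating run"
--     # lengths of the interior predicate, plus the n-1 length-2 subarrays.
--     if all(x == arr[0] for x in arr):
--         return 0
--     n = len(arr)
--     total = n - 1
--     run = 0
--     for k in range(1, n - 1):
--         if arr[k - 1] < arr[k] > arr[k + 1] or arr[k - 1] > arr[k] < arr[k + 1]:
--             run += 1
--         else:
--             run = 0
--         total += run
--     return total
-- ===== Notes on version B (the rewrite author's own statement) =====
-- stated objective: faster
-- what changed: A enumerates every subarray of every length and re-checks the full interior peak/valley condition per subarray (three nested loops over slices); B makes a single pass over the array, maintaining the length of the current run of consecutive interior peaks/valleys and summing those run lengths (plus the n-1 length-2 subarrays), which counts exactly the same subarrays.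
import Mathlib
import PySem

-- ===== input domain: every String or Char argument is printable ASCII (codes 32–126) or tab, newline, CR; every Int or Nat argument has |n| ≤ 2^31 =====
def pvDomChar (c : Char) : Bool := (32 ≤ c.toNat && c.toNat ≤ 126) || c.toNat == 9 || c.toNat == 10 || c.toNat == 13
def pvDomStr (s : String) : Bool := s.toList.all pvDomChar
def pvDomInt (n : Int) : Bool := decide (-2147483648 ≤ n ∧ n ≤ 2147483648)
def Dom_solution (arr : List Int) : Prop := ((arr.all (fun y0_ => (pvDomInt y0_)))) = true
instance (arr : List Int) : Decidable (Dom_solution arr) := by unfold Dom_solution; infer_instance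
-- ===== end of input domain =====

-- B replaces A's O(n^3) enumeration of all subarrays with one O(n) pass that sums
-- alternating-run lengths of the interior peak/valley predicate (objective: faster).

-- ===== PORT A =====
-- the chained comparison `sub[j-1] < sub[j] > sub[j+1] or sub[j-1] > sub[j] < sub[j+1]`
def pvSaw (a b c : Int) : Bool := (a < b && b > c) || (a > b && b < c)

def solution (arr : List Int) : Int :=
  let n : Int := PySem.List.len arr
  if arr.all (fun x => x == PySem.List.pyGetD arr 0 0) then 0
  else
    (PySem.List.pyRange 2 (n + 1) 1).foldl (fun count length =>
      (PySem.List.pyRange 0 (n - length + 1) 1).foldl (fun count i =>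
        let subarray := PySem.List.slice arr (some i) (some (i + length))
        if (PySem.List.pyRange 1 (length - 1) 1).all (fun j =>
            pvSaw (PySem.List.pyGetD subarray (j - 1) 0)
                  (PySem.List.pyGetD subarray j 0)
                  (PySem.List.pyGetD subarray (j + 1) 0))
        then count + 1 else count) count) 0
  -- pyGetD is exact here: every index j-1, j, j+1 with j in range(1, length-1) lies inside the slice

-- ===== PORT B =====
def solution_alt (arr : List Int) : Int :=
  if arr.all (fun x => x == PySem.List.pyGetD arr 0 0) then 0
  else
    let n : Int := PySem.List.len arr
    (PySem.List.pyRange 1 (n - 1) 1).foldl (fun (st : Int × Int) k =>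
      let run : Int :=
        if pvSaw (PySem.List.pyGetD arr (k - 1) 0)
                 (PySem.List.pyGetD arr k 0)
                 (PySem.List.pyGetD arr (k + 1) 0)
        then st.2 + 1 else 0
      (st.1 + run, run)) (n - 1, 0) |>.1
  -- pyGetD is exact here: k ranges over 1 … n-2, so k-1, k, k+1 are in range

-- ===== PRECONDITION & SPEC =====
def Spec_solution (arr : List Int) (out : Int) : Prop := out = solution_alt arr
instance (arr : List Int) (out : Int) : Decidable (Spec_solution arr out) := by unfold Spec_solution; infer_instance

-- ===== CLAIM (what is proved, stated in full; the proofs are below) =====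
def Claim_equal_solution : Prop := ∀ (arr : List Int), Dom_solution arr → Spec_solution arr (solution arr)

-- ===== LEMMAS AND PROOFS =====

-- the interior peak/valley predicate of the ORIGINAL array, at left index k
def pvQ (arr : List Int) (k : Nat) : Bool :=
  pvSaw (arr.getD k 0) (arr.getD (k+1) 0) (arr.getD (k+2) 0)
-- abstract forms of the two counts, over an arbitrary predicate Q
def pvWin (Q : Nat → Bool) (t i : Nat) : Bool := (List.range t).all (fun u => Q (i + u))
def pvACnt (Q : Nat → Bool) (n : Nat) : Nat :=
  ((List.range (n-1)).map (fun t => (List.range (n-1-t)).countP (pvWin Q t))).sum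
def pvSrun (Q : Nat → Bool) : Nat → Nat
  | 0 => 0
  | m+1 => if Q m then pvSrun Q m + 1 else 0
def pvBRun (Q : Nat → Bool) (m : Nat) : Nat × Nat :=
  (List.range m).foldl
    (fun st v => (st.1 + (if Q v then st.2 + 1 else 0), if Q v then st.2 + 1 else 0)) (0, 0)

theorem pvSumMapAdd (l : List Nat) (f g : Nat → Nat) :
    (l.map (fun x => f x + g x)).sum = (l.map f).sum + (l.map g).sum := by
  induction l with
  | nil => simp
  | cons a l ih => simp [ih]; omega

theorem pvAllCongr (l : List Nat) (p q : Nat → Bool) (h : ∀ a ∈ l, p a = q a) :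
    l.all p = l.all q := by
  induction l with
  | nil => rfl
  | cons a l ih => simp only [List.all_cons, h a (by simp), ih (fun x hx => h x (by simp [hx]))]

theorem pvCountPRangeSucc (p : Nat → Bool) (n : Nat) :
    (List.range (n+1)).countP p = (List.range n).countP p + (if p n then 1 else 0) := by
  simp [List.range_succ, List.countP_append, List.countP_cons]

theorem pvSrun_le (Q : Nat → Bool) (m : Nat) : pvSrun Q m ≤ m := by
  induction m with
  | zero => simp [pvSrun]
  | succ m ih => simp only [pvSrun]; split <;> omega

theorem pvBRun_succ (Q : Nat → Bool) (m : Nat) :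
    pvBRun Q (m+1) = ((pvBRun Q m).1 + (if Q m then (pvBRun Q m).2 + 1 else 0),
                      if Q m then (pvBRun Q m).2 + 1 else 0) := by
  simp [pvBRun, List.range_succ, List.foldl_append]

theorem pvBRun_snd (Q : Nat → Bool) (m : Nat) : (pvBRun Q m).2 = pvSrun Q m := by
  induction m with
  | zero => rfl
  | succ m ih => rw [pvBRun_succ, pvSrun]; simp [ih]

theorem pvBRun_fst (Q : Nat → Bool) (m : Nat) :
    (pvBRun Q m).1 = (pvBRun Q (m-1)).1 + pvSrun Q m := by
  cases m with
  | zero => rfl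
  | succ m => rw [pvBRun_succ]; simp [pvBRun_snd, pvSrun]

-- a window of length t ending at position m-1 is all-true iff t is at most the current run
theorem pvWin_eq_decide (Q : Nat → Bool) : ∀ (t m : Nat), t ≤ m →
    pvWin Q t (m - t) = decide (t ≤ pvSrun Q m) := by
  intro t
  induction t with
  | zero => intro m _; simp [pvWin]
  | succ t ih =>
    intro m hm
    obtain ⟨m', rfl⟩ : ∃ m', m = m' + 1 := ⟨m - 1, by omega⟩
    have ht : t ≤ m' := by omega
    have e1 : m' + 1 - (t+1) = m' - t := by omega
    rw [pvWin, e1, List.range_succ, List.all_append]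
    have e2 : m' - t + t = m' := by omega
    simp only [List.all_cons, List.all_nil, Bool.and_true, e2]
    have := ih m' ht
    rw [pvWin] at this
    rw [this, pvSrun]
    cases hq : Q m' <;> simp

theorem pvIndSum (n s : Nat) :
    ((List.range n).map (fun t => if t ≤ s then 1 else 0)).sum = min n (s+1) := by
  induction n with
  | zero => simp
  | succ n ih =>
    rw [List.range_succ, List.map_append, List.sum_append, ih]
    simp only [List.map_cons, List.map_nil, List.sum_cons, List.sum_nil]
    split <;> omega

-- growing the array by one element adds one window per length, ending at the new element
theorem pvStep1 (Q : Nat → Bool) (n' : Nat) :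
    pvACnt Q (n'+2) = pvACnt Q (n'+1) +
      ((List.range (n'+1)).map (fun t => if pvWin Q t (n'-t) then 1 else 0)).sum := by
  unfold pvACnt
  simp only [Nat.succ_sub_one]
  have hr : List.range (n'+1) = List.range n' ++ [n'] := List.range_succ
  rw [hr]
  simp only [List.map_append, List.sum_append]
  have hcong : ∀ t ∈ List.range n',
      (List.range (n'+1-t)).countP (pvWin Q t)
        = (List.range (n'-t)).countP (pvWin Q t) + (if pvWin Q t (n'-t) then 1 else 0) := by
    intro t ht
    rw [List.mem_range] at ht
    have e : n' + 1 - t = (n' - t) + 1 := by omega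
    rw [e, pvCountPRangeSucc]
  rw [List.map_congr_left hcong, pvSumMapAdd]
  simp only [List.map_cons, List.map_nil, List.sum_cons, List.sum_nil, Nat.sub_self]
  have e1 : (List.range (n'+1-n')).countP (pvWin Q n') = if pvWin Q n' 0 then 1 else 0 := by
    have : n' + 1 - n' = 1 := by omega
    rw [this]
    simp [List.range_succ, List.countP_cons]
  rw [e1]; omega

theorem pvStep2 (Q : Nat → Bool) (n' : Nat) :
    ((List.range (n'+1)).map (fun t => if pvWin Q t (n'-t) then 1 else 0)).sum
      = 1 + pvSrun Q n' := by
  have hcong : ∀ t ∈ List.range (n'+1),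
      (if pvWin Q t (n'-t) then (1:Nat) else 0) = if t ≤ pvSrun Q n' then 1 else 0 := by
    intro t ht
    rw [List.mem_range] at ht
    rw [pvWin_eq_decide Q t n' (by omega)]
    simp
  rw [List.map_congr_left hcong, pvIndSum]
  have := pvSrun_le Q n'
  omega

-- the counting identity: A's window count equals (n-1) plus B's run-total
theorem pvMain (Q : Nat → Bool) : ∀ n, 1 ≤ n → pvACnt Q n = (n-1) + (pvBRun Q (n-2)).1 := by
  intro n
  induction n with
  | zero => omega
  | succ n ih =>
    intro _
    cases Nat.lt_or_ge n 1 with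
    | inl h =>
      interval_cases n
      simp [pvACnt, pvBRun]
    | inr h =>
      obtain ⟨n', rfl⟩ : ∃ n', n = n' + 1 := ⟨n - 1, by omega⟩
      have IH := ih (by omega)
      rw [show n' + 1 - 1 = n' from by omega, show n' + 1 - 2 = n' - 1 from by omega] at IH
      rw [show n' + 1 + 1 = n' + 2 from by omega]
      rw [show n' + 2 - 1 = n' + 1 from by omega, show n' + 2 - 2 = n' from by omega]
      rw [pvStep1, pvStep2, IH, pvBRun_fst Q n']
      omega

theorem pvLen2 (arr : List Int)
    (h : arr.all (fun x => x == PySem.List.pyGetD arr 0 0) = false) : 2 ≤ arr.length := by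
  match arr with
  | [] => simp at h
  | [a] => simp [PySem.List.pyGetD_zero_cons] at h
  | a :: b :: t => simp

theorem pvGetDSub (l : List Int) (i m u : Nat) (hu : u < m) :
    ((l.drop i).take m).getD u 0 = l.getD (i+u) 0 := by
  simp [List.getD_eq_getElem?_getD, hu, List.getElem?_drop]

-- A's slice-window condition is the window of pvQ at (t, i)
theorem pvWinBridge (arr : List Int) (t i : Nat) :
    ((PySem.List.pyRange 1 ((2 + (t:Int)) - 1) 1).all (fun j =>
        pvSaw (PySem.List.pyGetD (PySem.List.slice arr (some (i:Int)) (some ((i:Int) + (2 + (t:Int))))) (j - 1) 0)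
              (PySem.List.pyGetD (PySem.List.slice arr (some (i:Int)) (some ((i:Int) + (2 + (t:Int))))) j 0)
              (PySem.List.pyGetD (PySem.List.slice arr (some (i:Int)) (some ((i:Int) + (2 + (t:Int))))) (j + 1) 0)))
      = pvWin (pvQ arr) t i := by
  rw [show (i:Int) + (2 + (t:Int)) = (i:Int) + ((2+t : Nat) : Int) from by push_cast; ring]
  rw [PySem.List.slice_natCast_add]
  rw [PySem.List.pyRange_one, show ((2 + (t:Int)) - 1 - 1).toNat = t from by omega]
  rw [List.all_map]
  apply pvAllCongr
  intro u hu
  rw [List.mem_range] at hu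
  simp only [Function.comp]
  rw [show (1:Int) + (u:Int) - 1 = ((u : Nat) : Int) from by ring]
  rw [show (1:Int) + (u:Int) + 1 = ((u+2 : Nat) : Int) from by push_cast; ring]
  rw [show (1:Int) + (u:Int) = ((u+1 : Nat) : Int) from by push_cast; ring]
  rw [PySem.List.pyGetD_natCast, PySem.List.pyGetD_natCast, PySem.List.pyGetD_natCast]
  rw [pvGetDSub arr i (2+t) u (by omega), pvGetDSub arr i (2+t) (u+1) (by omega),
      pvGetDSub arr i (2+t) (u+2) (by omega)]
  rw [pvQ, show i + (u+1) = (i+u)+1 from by omega, show i + (u+2) = (i+u)+2 from by omega]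

theorem pvA_eq (arr : List Int)
    (h : arr.all (fun x => x == PySem.List.pyGetD arr 0 0) = false) :
    solution arr = ((pvACnt (pvQ arr) arr.length : Nat) : Int) := by
  unfold solution
  simp only [PySem.List.len_eq, h, Bool.false_eq_true, if_false]
  rw [PySem.List.pyRange_one]
  rw [show ((arr.length : Int) + 1 - 2).toNat = arr.length - 1 from by omega]
  rw [List.foldl_map]
  have hstep : ∀ (count : Int), ∀ t ∈ List.range (arr.length - 1),
      (PySem.List.pyRange 0 ((arr.length : Int) - (2 + (t:Int)) + 1) 1).foldl (fun count i =>
        let subarray := PySem.List.slice arr (some i) (some (i + (2 + (t:Int))))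
        if (PySem.List.pyRange 1 ((2 + (t:Int)) - 1) 1).all (fun j =>
            pvSaw (PySem.List.pyGetD subarray (j - 1) 0)
                  (PySem.List.pyGetD subarray j 0)
                  (PySem.List.pyGetD subarray (j + 1) 0))
        then count + 1 else count) count
      = count + (((List.range (arr.length - 1 - t)).countP (pvWin (pvQ arr) t) : Nat) : Int) := by
    intro count t ht
    rw [List.mem_range] at ht
    rw [show (arr.length : Int) - (2 + (t:Int)) + 1 = ((arr.length - 1 - t : Nat) : Int) from by omega]
    rw [PySem.List.pyRange_zero_nat, List.foldl_map]
    have hinner : ∀ (c : Int), ∀ i ∈ List.range (arr.length - 1 - t),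
        (fun (count : Int) (i : Int) =>
          let subarray := PySem.List.slice arr (some i) (some (i + (2 + (t:Int))))
          if (PySem.List.pyRange 1 ((2 + (t:Int)) - 1) 1).all (fun j =>
              pvSaw (PySem.List.pyGetD subarray (j - 1) 0)
                    (PySem.List.pyGetD subarray j 0)
                    (PySem.List.pyGetD subarray (j + 1) 0))
          then count + 1 else count) c ((i : Nat) : Int)
        = if pvWin (pvQ arr) t i then c + 1 else c := by
      intro c i hi
      show (if ((PySem.List.pyRange 1 ((2 + (t:Int)) - 1) 1).all (fun j =>
              pvSaw (PySem.List.pyGetD (PySem.List.slice arr (some (i:Int)) (some ((i:Int) + (2 + (t:Int))))) (j - 1) 0)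
                    (PySem.List.pyGetD (PySem.List.slice arr (some (i:Int)) (some ((i:Int) + (2 + (t:Int))))) j 0)
                    (PySem.List.pyGetD (PySem.List.slice arr (some (i:Int)) (some ((i:Int) + (2 + (t:Int))))) (j + 1) 0)))
            then c + 1 else c)
          = if pvWin (pvQ arr) t i then c + 1 else c
      rw [pvWinBridge arr t i]
    rw [PySem.List.foldl_congr_mem _ _ _ _ hinner]
    rw [PySem.List.foldl_if_add_one]
  rw [PySem.List.foldl_congr_mem _ _ _ _ hstep, PySem.List.foldl_add]
  rw [pvACnt, Nat.cast_list_sum, List.map_map]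
  simp [Function.comp_def]

theorem pvIntFold (Q : Nat → Bool) (m : Nat) (c : Int) :
    (List.range m).foldl (fun (st : Int × Int) v =>
        (st.1 + (if Q v then st.2 + 1 else 0), if Q v then st.2 + 1 else 0)) (c, 0)
      = (c + ((pvBRun Q m).1 : Int), ((pvBRun Q m).2 : Int)) := by
  induction m with
  | zero => simp [pvBRun]
  | succ m ih =>
    rw [List.range_succ, List.foldl_append, ih, pvBRun_succ]
    cases hq : Q m with
    | false => simp [hq]
    | true => simp [hq]; ring

theorem pvB_eq (arr : List Int)
    (h : arr.all (fun x => x == PySem.List.pyGetD arr 0 0) = false) :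
    solution_alt arr = ((arr.length : Int) - 1) + ((pvBRun (pvQ arr) (arr.length - 2)).1 : Int) := by
  have hlen := pvLen2 arr h
  unfold solution_alt
  simp only [PySem.List.len_eq, h, Bool.false_eq_true, if_false]
  rw [PySem.List.pyRange_one]
  rw [show ((arr.length : Int) - 1 - 1).toNat = arr.length - 2 from by omega]
  rw [List.foldl_map]
  have hcong : ∀ (st : Int × Int), ∀ v ∈ List.range (arr.length - 2),
      (fun (st : Int × Int) (k : Int) =>
        let run : Int :=
          if pvSaw (PySem.List.pyGetD arr (k - 1) 0)
                   (PySem.List.pyGetD arr k 0)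
                   (PySem.List.pyGetD arr (k + 1) 0)
          then st.2 + 1 else 0
        (st.1 + run, run)) st (1 + (v : Int))
      = (st.1 + (if pvQ arr v then st.2 + 1 else 0), if pvQ arr v then st.2 + 1 else 0) := by
    intro st v hv
    show (let run : Int :=
            if pvSaw (PySem.List.pyGetD arr (1 + (v:Int) - 1) 0)
                     (PySem.List.pyGetD arr (1 + (v:Int)) 0)
                     (PySem.List.pyGetD arr (1 + (v:Int) + 1) 0)
            then st.2 + 1 else 0
          (st.1 + run, run))
        = (st.1 + (if pvQ arr v then st.2 + 1 else 0), if pvQ arr v then st.2 + 1 else 0)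
    rw [show (1:Int) + (v:Int) - 1 = ((v : Nat) : Int) from by ring]
    rw [show (1:Int) + (v:Int) + 1 = ((v+2 : Nat) : Int) from by push_cast; ring]
    rw [show (1:Int) + (v:Int) = ((v+1 : Nat) : Int) from by push_cast; ring]
    rw [PySem.List.pyGetD_natCast, PySem.List.pyGetD_natCast, PySem.List.pyGetD_natCast]
    rfl
  rw [PySem.List.foldl_congr_mem _ _ _ _ hcong, pvIntFold]

-- ===== VERDICT (by name: the statement is the Claim_ definition above) =====
theorem solution_spec : Claim_equal_solution := by
  unfold Claim_equal_solution Spec_solution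
  intro arr _
  cases hg : arr.all (fun x => x == PySem.List.pyGetD arr 0 0) with
  | true => unfold solution solution_alt; simp [hg]
  | false =>
    have hlen := pvLen2 arr hg
    rw [pvA_eq arr hg, pvB_eq arr hg, pvMain (pvQ arr) arr.length (by omega)]
    push_cast
    rw [Nat.cast_sub (by omega)]
    push_cast
    ring
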